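-- pv_equiv track=rewrite | github.com/xguse/BiBench | bin/util.py | extract_help
-- ===== SOURCE A (Python) =====
-- def extract_help(string):
--     """
--     Given the docstring of a function, tries to extract just the
--     summary.
--
--     Assumes the summary is in the first lines before a double newline.
--
--     """
--
--     lines = [l.strip() for l in string.split('\n')]
--     try:
--         while lines[0] == '':
--             lines.pop(0)
--     except IndexError:
--         return ''
--     helpstring = []
--     if lines.count('') == 0:
--         helpstring = lines
--     else:
--         while lines[0] != '':
--             helpstring.append(lines.pop(0))
--     return '\n'.join(helpstring)
-- ===== SOURCE B (Python) =====
-- def extract_help(string):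
--     """Summary = first paragraph: normalize to one stripped-lines string, then cut at the first blank line."""
--     text = '\n'.join(line.strip() for line in string.split('\n')).lstrip('\n')
--     cut = text.find('\n\n')
--     para = text if cut == -1 else text[:cut]
--     return para.rstrip('\n')
-- ===== Notes on version B (the rewrite author's own statement) =====
-- stated objective: idiomatic
-- what changed: Replaces the two explicit while-loops (pop leading blanks with a try/IndexError, then pop-and-append up to the first blank) and the blank-line count scan with a single string-level decomposition: join the stripped lines, lstrip the leading newlines, cut at the first blank line, rstrip the trailing newline.
import Mathlib
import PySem

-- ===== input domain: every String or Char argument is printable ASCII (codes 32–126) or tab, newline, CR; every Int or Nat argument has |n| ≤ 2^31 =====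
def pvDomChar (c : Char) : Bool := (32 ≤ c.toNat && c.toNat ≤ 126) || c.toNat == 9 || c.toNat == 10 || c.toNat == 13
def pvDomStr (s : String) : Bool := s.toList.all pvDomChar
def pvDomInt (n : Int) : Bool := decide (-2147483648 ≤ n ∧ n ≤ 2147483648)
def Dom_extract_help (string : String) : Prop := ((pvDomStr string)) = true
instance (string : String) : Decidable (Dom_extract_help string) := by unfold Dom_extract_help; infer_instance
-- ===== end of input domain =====

-- B is an idiomatic string-level rewrite of A (join stripped lines, lstrip, cut at the first '\n\n', rstrip);
-- equal return value on every input, no speed claim.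

-- ===== PORT A =====
-- while lines[0] == ...: lines.pop(0)  — none = the IndexError branch (list exhausted, A returns the empty string)
def aDropBlank : List (List Char) → Option (List (List Char))
  | [] => none
  | l :: ls => if l = [] then aDropBlank ls else some (l :: ls)

-- while lines[0] != ...: helpstring.append(lines.pop(0))  — only entered when a blank line exists, so the [] case is unreachable
def aTakeNonblank : List (List Char) → List (List Char)
  | [] => []
  | l :: ls => if l = [] then [] else l :: aTakeNonblank ls

def extract_help (string : String) : String :=
  let lines := (PySem.Chars.splitOn string.toList ['\n']).map PySem.Chars.strip
  match aDropBlank lines with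
  | none => ""
  | some lines =>
    let helpstring := if PySem.List.count lines [] = 0 then lines else aTakeNonblank lines
    String.mk (PySem.Chars.join ['\n'] helpstring)

-- ===== PORT B =====
def extract_help_alt (string : String) : String :=
  let text := PySem.Chars.join ['\n'] ((PySem.Chars.splitOn string.toList ['\n']).map PySem.Chars.strip)
  let text := text.dropWhile (· == '\n')                    -- .lstrip('\n'): exact (drops leading '\n' chars)
  let cut := PySem.Chars.find text ['\n', '\n']
  let para := if cut = -1 then text else PySem.Chars.slice text none (some cut)
  String.mk ((para.reverse.dropWhile (· == '\n')).reverse)  -- .rstrip('\n'): exact (drops trailing '\n' chars)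

-- ===== PRECONDITION & SPEC =====
def Spec_extract_help (string : String) (out : String) : Prop := out = extract_help_alt string
instance (string : String) (out : String) : Decidable (Spec_extract_help string out) := by unfold Spec_extract_help; infer_instance

-- ===== CLAIM (what is proved, stated in full; the proofs are below) =====
def Claim_equal_extract_help : Prop := ∀ (string : String), Dom_extract_help string → Spec_extract_help string (extract_help string)

-- ===== LEMMAS AND PROOFS =====

-- a pure cons-level model of PySem.Chars.splitOn with a single-character separator
def splitChar (c : Char) : List Char → List (List Char)
  | [] => [[]]
  | a :: rest => if a = c then [] :: splitChar c rest else (splitChar c rest).modifyHead (a :: ·)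

theorem go_eq (c : Char) (fuel : Nat) (l cur : List Char) (acc : List (List Char)) (h : l.length < fuel) :
    PySem.Chars.splitOn.go [c] fuel l cur acc = acc.reverse ++ (splitChar c l).modifyHead (cur.reverse ++ ·) := by
  induction fuel generalizing l cur acc with
  | zero => omega
  | succ fuel ih =>
    cases l with
    | nil => simp [PySem.Chars.splitOn.go, splitChar]
    | cons a rest =>
      rw [PySem.Chars.splitOn.go]
      by_cases hac : a = c
      · subst hac
        have hp : List.isPrefixOf [a] (a :: rest) = true := by simp [List.isPrefixOf]
        simp only [hp, if_pos]
        rw [ih _ _ _ (by simpa using Nat.lt_of_succ_lt_succ (by simpa using h))]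
        simp only [splitChar, if_pos rfl]
        cases hsc : splitChar a rest <;> simp [hsc]
      · have hp : List.isPrefixOf [c] (a :: rest) = false := by
          simp [List.isPrefixOf]; exact fun h' => hac h'.symm
        simp only [hp, Bool.false_eq_true, if_neg, not_false_iff]
        rw [ih _ _ _ (by simpa using Nat.lt_of_succ_lt_succ (by simpa using h))]
        simp only [splitChar, if_neg hac, List.modifyHead_modifyHead]
        congr 2
        funext x
        simp

theorem splitOn_eq_splitChar (c : Char) (s : List Char) :
    PySem.Chars.splitOn s [c] = splitChar c s := by
  rw [PySem.Chars.splitOn, go_eq c _ s [] [] (by omega)]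
  cases hsc : splitChar c s <;> simp

theorem splitChar_not_mem (c : Char) (s : List Char) : ∀ l ∈ splitChar c s, c ∉ l := by
  induction s with
  | nil => simp [splitChar]
  | cons a rest ih =>
    intro l hl
    by_cases hac : a = c
    · subst hac
      simp [splitChar] at hl
      rcases hl with h1 | h1
      · simp [h1]
      · exact ih l h1
    · simp only [splitChar, if_neg hac] at hl
      cases hsc : splitChar c rest with
      | nil => simp [hsc] at hl
      | cons m ms =>
        rw [hsc] at hl
        simp only [List.modifyHead_cons, List.mem_cons] at hl
        rcases hl with h | h
        · subst h
          intro hmem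
          rcases List.mem_cons.mp hmem with h | h
          · exact hac h.symm
          · exact ih m (by rw [hsc]; exact List.mem_cons_self) h
        · exact ih l (by rw [hsc]; exact List.mem_cons_of_mem _ h)

theorem strip_subset (l : List Char) : ∀ c ∈ PySem.Chars.strip l, c ∈ l := by
  intro c hc
  simp only [PySem.Chars.strip, PySem.Chars.rstrip, PySem.Chars.lstrip] at hc
  have h1 := (List.dropWhile_sublist (l := (List.dropWhile PySem.Chars.isspace l).reverse)
      (p := PySem.Chars.isspace)).mem (by simpa using hc)
  have h2 := (List.dropWhile_sublist (l := l) (p := PySem.Chars.isspace)).mem (by simpa using h1)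
  exact h2

-- GoodNN u: no two adjacent newlines, even after appending one '\n' (so u also does not end in '\n')
def GoodNN (u : List Char) : Prop := ¬ ['\n', '\n'] <:+: (u ++ ['\n'])

theorem goodNN_of_not_mem {u : List Char} (h : '\n' ∉ u) : GoodNN u := by
  intro hinf
  have hcount : (['\n', '\n'] : List Char).count '\n' ≤ (u ++ ['\n']).count '\n' :=
    hinf.sublist.count_le '\n'
  simp [List.count_append, List.count_eq_zero.mpr h] at hcount

theorem goodNN_getLast {u : List Char} (h : GoodNN u) : u.getLast? ≠ some '\n' := by
  intro hl
  rcases List.getLast?_eq_some_iff.mp hl with ⟨u', rfl⟩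
  exact h ⟨u', [], by simp⟩

theorem goodNN_not_infix {u : List Char} (h : GoodNN u) : ¬ ['\n', '\n'] <:+: u :=
  fun hinf => h (hinf.trans ⟨[], ['\n'], by simp⟩)

-- head of a join over a nonempty first line
theorem join_head? (q : List Char) (rest : List (List Char)) (hq : q ≠ []) :
    (PySem.Chars.join ['\n'] (q :: rest)).head? = q.head? := by
  cases rest with
  | nil => rw [PySem.Chars.join_singleton]
  | cons r rs =>
    rw [PySem.Chars.join_cons_cons]
    cases q with
    | nil => exact absurd rfl hq
    | cons a t => simp

theorem join_ne_nil (q : List Char) (rest : List (List Char)) (hq : q ≠ []) :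
    PySem.Chars.join ['\n'] (q :: rest) ≠ [] := by
  intro hnil
  have := join_head? q rest hq
  rw [hnil] at this
  cases q with
  | nil => exact hq rfl
  | cons a t => simp at this

theorem goodNN_glue (p J : List Char) (hp : '\n' ∉ p) (hJ : GoodNN J)
    (hJne : J ≠ []) (hJh : J.head? ≠ some '\n') : GoodNN (p ++ '\n' :: J) := by
  intro hinf
  have hinf' : ['\n', '\n'] <:+: p ++ '\n' :: (J ++ ['\n']) := by simpa using hinf
  obtain ⟨j, hpre⟩ := (PySem.Chars.exists_prefix_drop_iff_isIn _ _).mpr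
    ((PySem.Chars.isIn_iff_infix _ _).mpr hinf')
  rcases lt_trichotomy j p.length with hj | hj | hj
  · have hdrop : (p ++ '\n' :: (J ++ ['\n'])).drop j = p.drop j ++ '\n' :: (J ++ ['\n']) := by
      rw [List.drop_append, Nat.sub_eq_zero_of_le hj.le]
      simp
    have hd : p.drop j ≠ [] := by
      intro hnil
      have := congrArg List.length hnil
      simp at this
      omega
    obtain ⟨a, t, hat⟩ := List.exists_cons_of_ne_nil hd
    rw [hdrop, hat] at hpre
    have ha : a = '\n' := ((List.cons_prefix_cons).mp (by simpa using hpre)).1.symm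
    have hmem : a ∈ p := (List.drop_sublist j p).mem (by simp [hat])
    exact hp (ha ▸ hmem)
  · have hdrop : (p ++ '\n' :: (J ++ ['\n'])).drop j = '\n' :: (J ++ ['\n']) := by
      rw [hj, List.drop_left]
    rw [hdrop] at hpre
    have h2 : ['\n'] <+: J ++ ['\n'] := (List.cons_prefix_cons.mp hpre).2
    obtain ⟨b, u, hbu⟩ := List.exists_cons_of_ne_nil hJne
    rw [hbu] at h2
    have hb : '\n' = b := by simpa using h2
    exact hJh (by rw [hbu, ← hb]; rfl)
  · have hs : p ++ '\n' :: (J ++ ['\n']) = (p ++ ['\n']) ++ (J ++ ['\n']) := by simp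
    have hdrop : (p ++ '\n' :: (J ++ ['\n'])).drop j
        = (J ++ ['\n']).drop (j - (p.length + 1)) := by
      rw [hs, List.drop_append]
      have h1 : (p ++ ['\n']).drop j = [] := by
        apply List.drop_eq_nil_of_le
        simp
        omega
      rw [h1]
      simp
    rw [hdrop] at hpre
    exact hJ (hpre.isInfix.trans (List.drop_suffix _ _).isInfix)

theorem goodNN_join (M : List (List Char)) (hM : M ≠ [])
    (h : ∀ l ∈ M, l ≠ [] ∧ '\n' ∉ l) : GoodNN (PySem.Chars.join ['\n'] M) := by
  induction M with
  | nil => exact absurd rfl hM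
  | cons q rest ih =>
    cases rest with
    | nil =>
      have := h q (by simp)
      rw [PySem.Chars.join_singleton]
      exact goodNN_of_not_mem this.2
    | cons r rs =>
      rw [PySem.Chars.join_cons_cons]
      have hq := h q (by simp)
      have hJ := ih (by simp) (fun l hl => h l (by simp [hl]))
      have hr := h r (by simp)
      have hhd : (PySem.Chars.join ['\n'] (r :: rs)).head? ≠ some '\n' := by
        rw [join_head? r rs hr.1]
        intro hc
        exact hr.2 (List.mem_of_mem_head? (by simp [hc]))
      have := goodNN_glue q (PySem.Chars.join ['\n'] (r :: rs)) hq.2 hJ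
        (join_ne_nil r rs hr.1) hhd
      simpa using this

-- join over an all-blank prefix is a block of newlines
theorem join_blank_prefix (E : List (List Char)) (M : List (List Char)) (hE : ∀ l ∈ E, l = [])
    (hM : M ≠ []) :
    PySem.Chars.join ['\n'] (E ++ M) = List.replicate E.length '\n' ++ PySem.Chars.join ['\n'] M := by
  induction E with
  | nil => simp
  | cons e E' ih =>
    have he : e = [] := hE e (by simp)
    subst he
    have hne : E' ++ M ≠ [] := by simp [hM]
    cases hEM : E' ++ M with
    | nil => exact absurd hEM hne
    | cons x xs =>
      rw [List.cons_append, hEM, PySem.Chars.join_cons_cons, ← hEM,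
        ih (fun l hl => hE l (by simp [hl]))]
      simp [List.replicate_succ]

theorem join_split (F M : List (List Char)) (hF : F ≠ []) (hM : M ≠ []) :
    PySem.Chars.join ['\n'] (F ++ M) =
      PySem.Chars.join ['\n'] F ++ '\n' :: PySem.Chars.join ['\n'] M := by
  induction F with
  | nil => exact absurd rfl hF
  | cons f F' ih =>
    cases F' with
    | nil =>
      cases M with
      | nil => exact absurd rfl hM
      | cons m ms =>
        rw [List.singleton_append, PySem.Chars.join_cons_cons, PySem.Chars.join_singleton]
        simp
    | cons g gs =>
      simp only [List.cons_append] at ih ⊢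
      rw [PySem.Chars.join_cons_cons, PySem.Chars.join_cons_cons, ih (by simp)]
      simp

-- all characters of a join of blank lines are newlines
theorem join_blank_all (E : List (List Char)) (hE : ∀ l ∈ E, l = []) :
    ∀ c ∈ PySem.Chars.join ['\n'] E, c = '\n' := by
  induction E with
  | nil => rw [PySem.Chars.join_nil]; simp
  | cons e E' ih =>
    have he : e = [] := hE e (by simp)
    subst he
    cases E' with
    | nil => rw [PySem.Chars.join_singleton]; simp
    | cons x xs =>
      rw [PySem.Chars.join_cons_cons]
      intro c hc
      simp only [List.nil_append, List.mem_cons, List.mem_append] at hc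
      rcases hc with h1 | h1
      · simpa using h1
      · exact ih (fun l hl => hE l (by simp [hl])) c h1

theorem find_nn_neg_one (u : List Char) (hu : GoodNN u) :
    PySem.Chars.find u ['\n', '\n'] = -1 :=
  (PySem.Chars.find_eq_neg_one_iff _ _).mpr (goodNN_not_infix hu)

theorem find_nn_neg_one' (u : List Char) (hu : GoodNN u) :
    PySem.Chars.find (u ++ ['\n']) ['\n', '\n'] = -1 :=
  (PySem.Chars.find_eq_neg_one_iff _ _).mpr hu

theorem find_nn_boundary (u w : List Char) (hu : GoodNN u) :
    PySem.Chars.find (u ++ '\n' :: '\n' :: w) ['\n', '\n'] = (u.length : Int) := by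
  have hinf : ['\n', '\n'] <:+: u ++ '\n' :: '\n' :: w := ⟨u, w, by simp⟩
  have hpos : 0 ≤ PySem.Chars.find (u ++ '\n' :: '\n' :: w) ['\n', '\n'] :=
    (PySem.Chars.find_nonneg_iff _ _).mpr hinf
  obtain ⟨hpre, hmin⟩ := PySem.Chars.find_spec hpos
  set n := (PySem.Chars.find (u ++ '\n' :: '\n' :: w) ['\n', '\n']).toNat with hn
  have hle : n ≤ u.length := by
    by_contra hgt
    exact hmin u.length (by omega) ⟨w, by rw [List.drop_left]; rfl⟩
  have hge : u.length ≤ n := by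
    by_contra hlt
    rw [not_le] at hlt
    have hdrop : (u ++ '\n' :: '\n' :: w).drop n = u.drop n ++ '\n' :: '\n' :: w := by
      rw [List.drop_append, Nat.sub_eq_zero_of_le hlt.le]
      simp
    rw [hdrop] at hpre
    have hd : u.drop n ≠ [] := by
      intro hnil
      have := congrArg List.length hnil
      simp at this
      omega
    obtain ⟨a, t, hat⟩ := List.exists_cons_of_ne_nil hd
    cases t with
    | nil =>
      rw [hat] at hpre
      have ha : '\n' = a := by simpa using hpre
      have : u.getLast? = some a := by
        have hsuf : [a] <:+ u := hat ▸ List.drop_suffix n u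
        obtain ⟨pre, hpre'⟩ := hsuf
        rw [← hpre']
        simp
      exact goodNN_getLast hu (by rw [this, ha])
    | cons b t' =>
      rw [hat] at hpre
      obtain ⟨h1, h2⟩ := List.cons_prefix_cons.mp hpre
      have h3 : '\n' = b := by simpa using h2
      have : ['\n', '\n'] <:+: u := by
        have hsuf : a :: b :: t' <:+ u := hat ▸ List.drop_suffix n u
        exact (List.IsPrefix.isInfix (l₁ := ['\n','\n']) (by rw [← h1, ← h3] at hat ⊢; exact ⟨t', rfl⟩)).trans hsuf.isInfix
      exact goodNN_not_infix hu this
  have : n = u.length := le_antisymm hle hge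
  omega

-- dropWhile facts for the lstrip('\n') step
theorem dropWhile_nl_all (l : List Char) (h : ∀ c ∈ l, c = '\n') :
    l.dropWhile (· == '\n') = [] :=
  List.dropWhile_eq_nil_iff.mpr (fun c hc => by simp [h c hc])

theorem dropWhile_nl_head (l : List Char) (a : Char) (ha : l.head? = some a) (hne : a ≠ '\n') :
    l.dropWhile (· == '\n') = l := by
  apply List.dropWhile_eq_self_iff.mpr
  intro hl
  have : l[0] = a := by
    cases l with
    | nil => simp at hl
    | cons x xs => simpa using ha
  simp [this, hne]

theorem dropWhile_nl_replicate (n : Nat) (X : List Char) :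
    (List.replicate n '\n' ++ X).dropWhile (· == '\n') = X.dropWhile (· == '\n') := by
  induction n with
  | zero => simp
  | succ m ih => rw [List.replicate_succ, List.cons_append, List.dropWhile_cons_of_pos (by simp)]; exact ih

-- rstrip('\n') facts
theorem rstrip_nl_noop (u : List Char) (h : u.getLast? ≠ some '\n') :
    (u.reverse.dropWhile (· == '\n')).reverse = u := by
  cases hr : u.reverse with
  | nil => simpa using congrArg List.reverse hr
  | cons a t =>
    have ha : u.getLast? = some a := by rw [← List.head?_reverse, hr]; rfl
    have hane : a ≠ '\n' := fun hc => h (by rw [ha, hc])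
    rw [← hr, dropWhile_nl_head _ a (by rw [List.head?_reverse, ha]) hane]
    exact List.reverse_reverse u

theorem rstrip_nl_one (u : List Char) (h : u.getLast? ≠ some '\n') :
    ((u ++ ['\n']).reverse.dropWhile (· == '\n')).reverse = u := by
  rw [List.reverse_append]
  simp only [List.reverse_cons, List.reverse_nil, List.nil_append, List.singleton_append]
  rw [List.dropWhile_cons_of_pos (by simp)]
  exact rstrip_nl_noop u h
  
-- A-side loop characterizations
theorem aDropBlank_all_blank (E : List (List Char)) (hE : ∀ l ∈ E, l = []) :
    aDropBlank E = none := by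
  induction E with
  | nil => rfl
  | cons e E' ih =>
    rw [aDropBlank, if_pos (hE e (by simp))]
    exact ih (fun l hl => hE l (by simp [hl]))

theorem aDropBlank_skip (E L' : List (List Char)) (hE : ∀ l ∈ E, l = [])
    (hne : L' ≠ []) (h : L'.head? ≠ some []) : aDropBlank (E ++ L') = some L' := by
  induction E with
  | nil =>
    cases L' with
    | nil => exact absurd rfl hne
    | cons x xs =>
      have hx : ¬ x = [] := fun hc => h (by rw [hc]; rfl)
      rw [List.nil_append, aDropBlank, if_neg hx]
  | cons e E' ih =>
    rw [List.cons_append, aDropBlank, if_pos (hE e (by simp))]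
    exact ih (fun l hl => hE l (by simp [hl]))

theorem aTakeNonblank_spec (F rest : List (List Char)) (hF : ∀ l ∈ F, l ≠ []) :
    aTakeNonblank (F ++ [] :: rest) = F := by
  induction F with
  | nil => rw [List.nil_append, aTakeNonblank, if_pos rfl]
  | cons f F' ih =>
    rw [List.cons_append, aTakeNonblank, if_neg (hF f (by simp))]
    rw [ih (fun l hl => hF l (by simp [hl]))]

theorem aTakeNonblank_congr {R F rest : List (List Char)} (h : R = F ++ [] :: rest)
    (hF : ∀ l ∈ F, l ≠ [] ∧ '\n' ∉ l) : aTakeNonblank R = F := by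
  rw [h]
  exact aTakeNonblank_spec F rest (fun l hl => (hF l hl).1)

-- the shared core: A's list surgery equals B's string surgery, for any stripped line list
theorem core_eq (L : List (List Char)) (hL : ∀ l ∈ L, '\n' ∉ l) :
    (match aDropBlank L with
     | none => ([] : List Char)
     | some L' => PySem.Chars.join ['\n']
         (if PySem.List.count L' [] = 0 then L' else aTakeNonblank L')) =
    (let text := (PySem.Chars.join ['\n'] L).dropWhile (· == '\n')
     let cut := PySem.Chars.find text ['\n', '\n']
     let para := if cut = -1 then text else PySem.Chars.slice text none (some cut)
     (para.reverse.dropWhile (· == '\n')).reverse) := by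
  have hEb : ∀ l ∈ L.takeWhile (· == []), l = [] :=
    fun l hl => by simpa using List.mem_takeWhile_imp hl
  cases hR : L.dropWhile (· == []) with
  | nil =>
    -- every line is blank: A hits the IndexError, B's normalized text is all newlines
    have hall : ∀ l ∈ L, l = [] := fun l hl => by
      simpa using List.dropWhile_eq_nil_iff.mp hR l hl
    rw [aDropBlank_all_blank L hall]
    have htext : (PySem.Chars.join ['\n'] L).dropWhile (· == '\n') = [] :=
      dropWhile_nl_all _ (join_blank_all L hall)
    simp only [htext]
    have hfind : PySem.Chars.find ([] : List Char) ['\n', '\n'] = -1 :=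
      (PySem.Chars.find_eq_neg_one_iff _ _).mpr (by simp)
    simp [hfind]
  | cons h t =>
    have hsplit : L = L.takeWhile (· == []) ++ h :: t := by
      rw [← hR, List.takeWhile_append_dropWhile]
    have hh : h ≠ [] := by
      have := List.head?_dropWhile_not (· == []) L
      rw [hR] at this
      simpa using this
    have hmemL : ∀ l ∈ h :: t, '\n' ∉ l := fun l hl =>
      hL l ((List.dropWhile_sublist _).mem (hR ▸ hl))
    -- A drops the blank prefix
    have hA : aDropBlank L = some (h :: t) := by
      conv_lhs => rw [hsplit]
      exact aDropBlank_skip _ _ hEb (by simp) (by simpa using hh)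
    simp only [hA]
    -- B's lstrip lands at the same place
    have hjoin : PySem.Chars.join ['\n'] L
        = List.replicate (L.takeWhile (· == [])).length '\n' ++ PySem.Chars.join ['\n'] (h :: t) := by
      calc PySem.Chars.join ['\n'] L
          = PySem.Chars.join ['\n'] (L.takeWhile (· == []) ++ h :: t) := by rw [← hsplit]
        _ = _ := join_blank_prefix _ _ hEb (by simp)
    obtain ⟨a, h', hah⟩ := List.exists_cons_of_ne_nil hh
    have hanl : a ≠ '\n' := fun hc => hmemL h (by simp) (by simp [hah, hc])
    have htext : (PySem.Chars.join ['\n'] L).dropWhile (· == '\n')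
        = PySem.Chars.join ['\n'] (h :: t) := by
      rw [hjoin, dropWhile_nl_replicate]
      exact dropWhile_nl_head _ a (by rw [join_head? h t hh, hah]; rfl) hanl
    simp only [htext]
    by_cases hc : PySem.List.count (h :: t) [] = 0
    · -- no blank line: the whole tail is the summary
      have hnb : ([] : List Char) ∉ h :: t := by
        have : List.count ([] : List Char) (h :: t) = 0 := hc
        exact List.count_eq_zero.mp this
      have hgood : GoodNN (PySem.Chars.join ['\n'] (h :: t)) :=
        goodNN_join _ (by simp) (fun l hl => ⟨fun he => hnb (he ▸ hl), hmemL l hl⟩)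
      rw [if_pos hc, if_pos (find_nn_neg_one _ hgood)]
      exact (rstrip_nl_noop _ (goodNN_getLast hgood)).symm
    · -- a blank line exists: cut there
      rw [if_neg hc]
      have hnb : ([] : List Char) ∈ h :: t := by
        by_contra hn
        exact hc (List.count_eq_zero.mpr hn)
      have hFsplit : h :: t = (h :: t).takeWhile (fun l => !(l == []))
          ++ (h :: t).dropWhile (fun l => !(l == [])) :=
        (List.takeWhile_append_dropWhile).symm
      cases hD : (h :: t).dropWhile (fun l => !(l == [])) with
      | nil =>
        exfalso
        have := List.dropWhile_eq_nil_iff.mp hD [] hnb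
        simp at this
      | cons d rest =>
        have hd : d = [] := by
          have := List.head?_dropWhile_not (fun l => !(l == [])) (h :: t)
          rw [hD] at this
          simpa using this
        subst hd
        rw [hD] at hFsplit
        set F := (h :: t).takeWhile (fun l => !(l == [])) with hFdef
        have hFne : F ≠ [] := by
          rw [hFdef, List.takeWhile_cons_of_pos (by simp [hh])]
          simp
        have hFmem : ∀ l ∈ F, l ≠ [] ∧ '\n' ∉ l := fun l hl =>
          ⟨by simpa using List.mem_takeWhile_imp hl,
           hmemL l ((List.takeWhile_sublist _).mem hl)⟩
        have hgoodF : GoodNN (PySem.Chars.join ['\n'] F) := goodNN_join _ hFne hFmem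
        rw [aTakeNonblank_congr hFsplit hFmem]
        have hjoin2 : PySem.Chars.join ['\n'] (h :: t)
            = PySem.Chars.join ['\n'] F ++ '\n' :: PySem.Chars.join ['\n'] ([] :: rest) := by
          rw [hFsplit]
          exact join_split _ _ hFne (by simp)
        cases rest with
        | nil =>
          rw [hjoin2, PySem.Chars.join_singleton]
          rw [if_pos (find_nn_neg_one' _ hgoodF)]
          exact (rstrip_nl_one _ (goodNN_getLast hgoodF)).symm
        | cons r rs =>
          have hjr : PySem.Chars.join ['\n'] ([] :: r :: rs) = '\n' :: PySem.Chars.join ['\n'] (r :: rs) := by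
            rw [PySem.Chars.join_cons_cons]
            rfl
          rw [hjoin2, hjr]
          have hfind := find_nn_boundary (PySem.Chars.join ['\n'] F) (PySem.Chars.join ['\n'] (r :: rs)) hgoodF
          rw [show PySem.Chars.join ['\n'] F ++ '\n' :: '\n' :: PySem.Chars.join ['\n'] (r :: rs)
              = PySem.Chars.join ['\n'] F ++ ('\n' :: '\n' :: PySem.Chars.join ['\n'] (r :: rs)) from rfl,
            hfind]
          rw [if_neg (by omega)]
          have hslice : PySem.Chars.slice
              (PySem.Chars.join ['\n'] F ++ '\n' :: '\n' :: PySem.Chars.join ['\n'] (r :: rs)) none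
              (some ((PySem.Chars.join ['\n'] F).length : Int))
              = PySem.Chars.join ['\n'] F := by
            rw [PySem.Chars.slice_eq_listSlice, PySem.List.slice_to _ (by positivity)]
            simp only [Int.toNat_natCast]
            exact List.take_left
          rw [hslice]
          exact (rstrip_nl_noop _ (goodNN_getLast hgoodF)).symm

-- ===== VERDICT (by name: the statement is the Claim_ definition above) =====
theorem extract_help_spec : Claim_equal_extract_help := by
  intro s _
  unfold Spec_extract_help extract_help extract_help_alt
  have hL : ∀ l ∈ (PySem.Chars.splitOn s.toList ['\n']).map PySem.Chars.strip, '\n' ∉ l := by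
    intro l hl
    obtain ⟨m, hm, rfl⟩ := List.mem_map.mp hl
    rw [splitOn_eq_splitChar] at hm
    exact fun hc => splitChar_not_mem '\n' s.toList m hm (strip_subset m _ hc)
  have h := core_eq _ hL
  cases hd : aDropBlank ((PySem.Chars.splitOn s.toList ['\n']).map PySem.Chars.strip) with
  | none => rw [hd] at h; simp only [hd]; rw [← h]; rfl
  | some L' => rw [hd] at h; simp only [hd]; rw [← h]
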